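-- pv_equiv track=rewrite | github.com/xusiwei/pigweed | pw_console/py/pw_console/utils.py | get_line_height
-- ===== SOURCE A (Python) =====
-- def get_line_height(text_width, screen_width, prefix_width):
--     if text_width == 0:
--         return 0
--     if text_width < screen_width:
--         return 1
--
--     total_height = 1
--     remaining_width = text_width - screen_width
--
--     while (remaining_width + prefix_width) > screen_width:
--         remaining_width += prefix_width
--         remaining_width -= screen_width
--         total_height += 1
--
--     # Add one for the last line that is < screen_width
--     return total_height + 1
-- ===== SOURCE B (Python) =====
-- def get_line_height(text_width, screen_width, prefix_width):
--     if text_width == 0: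
--         return 0
--     if text_width < screen_width:
--         return 1
--     overflow = text_width - screen_width + prefix_width - screen_width
--     if overflow <= 0:
--         return 2
--     # ceiling division: number of extra wrapped lines beyond the first two
--     return 2 + -(-overflow // (screen_width - prefix_width))
-- ===== Notes on version B (the rewrite author's own statement) =====
-- stated objective: alternative
-- what changed: Replaced A's while-loop that subtracts (screen_width - prefix_width) one step at a time with a closed-form ceiling division computing the number of wrapped lines directly.
import Mathlib
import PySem

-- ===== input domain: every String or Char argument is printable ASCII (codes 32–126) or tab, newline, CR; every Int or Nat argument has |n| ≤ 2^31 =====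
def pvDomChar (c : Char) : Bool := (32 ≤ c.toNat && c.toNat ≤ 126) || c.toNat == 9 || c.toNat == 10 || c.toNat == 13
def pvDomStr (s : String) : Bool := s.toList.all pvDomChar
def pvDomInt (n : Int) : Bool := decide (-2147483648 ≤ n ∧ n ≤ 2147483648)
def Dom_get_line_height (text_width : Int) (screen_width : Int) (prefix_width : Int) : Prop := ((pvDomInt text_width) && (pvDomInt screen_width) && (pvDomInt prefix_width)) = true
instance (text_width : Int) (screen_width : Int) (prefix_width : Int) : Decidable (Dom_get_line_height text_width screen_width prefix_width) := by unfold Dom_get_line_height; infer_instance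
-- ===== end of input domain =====

-- ===== PORT A =====
-- while (remaining_width + prefix_width) > screen_width: remaining_width += prefix_width - screen_width; total_height += 1
-- The 'else 0' branch is a totality guard only: under Pre_ the loop condition with prefix_width >= screen_width never holds
-- (there the Python loop would not terminate).
def get_line_height_loop (screen_width prefix_width : Int) (remaining_width total_height : Int) : Int :=
  if remaining_width + prefix_width > screen_width then
    if prefix_width < screen_width then
      get_line_height_loop screen_width prefix_width (remaining_width + prefix_width - screen_width) (total_height + 1)
    else 0
  else total_height + 1
termination_by (remaining_width + prefix_width - screen_width).toNat
decreasing_by omega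

def get_line_height (text_width : Int) (screen_width : Int) (prefix_width : Int) : Int :=
  if text_width = 0 then 0
  else if text_width < screen_width then 1
  else get_line_height_loop screen_width prefix_width (text_width - screen_width) 1

-- ===== PORT B =====
def get_line_height_alt (text_width : Int) (screen_width : Int) (prefix_width : Int) : Int :=
  if text_width = 0 then 0
  else if text_width < screen_width then 1
  else
    let overflow := text_width - screen_width + prefix_width - screen_width
    if overflow <= 0 then 2
    else 2 + -(PySem.Int.floordiv (-overflow) (screen_width - prefix_width))

-- ===== PRECONDITION & SPEC =====
-- Pre_ excludes exactly the inputs on which A's while-loop never terminates (remaining width does not shrink: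
-- prefix_width >= screen_width while the loop condition holds); A returns on every input Pre_ admits.
def Pre_get_line_height (text_width : Int) (screen_width : Int) (prefix_width : Int) : Prop :=
  text_width = 0 ∨ text_width < screen_width ∨ text_width + prefix_width - 2 * screen_width ≤ 0 ∨ prefix_width < screen_width
instance (text_width : Int) (screen_width : Int) (prefix_width : Int) : Decidable (Pre_get_line_height text_width screen_width prefix_width) := by unfold Pre_get_line_height; infer_instance
def pvWitness_get_line_height : Int × Int × Int := (250, 80, 4)
def Spec_get_line_height (text_width : Int) (screen_width : Int) (prefix_width : Int) (out : Int) : Prop := out = get_line_height_alt text_width screen_width prefix_width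
instance (text_width : Int) (screen_width : Int) (prefix_width : Int) (out : Int) : Decidable (Spec_get_line_height text_width screen_width prefix_width out) := by unfold Spec_get_line_height; infer_instance

-- ===== CLAIM (what is proved, stated in full; the proofs are below) =====
def Claim_equal_get_line_height : Prop := ∀ (text_width : Int) (screen_width : Int) (prefix_width : Int), Dom_get_line_height text_width screen_width prefix_width → Pre_get_line_height text_width screen_width prefix_width → Spec_get_line_height text_width screen_width prefix_width (get_line_height text_width screen_width prefix_width)

-- ===== LEMMAS AND PROOFS =====

-- Closed form of A's loop when the per-step shrink s - p is positive.
theorem get_line_height_loop_eq (s p : Int) (hp : p < s) :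
    ∀ r h : Int, get_line_height_loop s p r h =
      if r + p ≤ s then h + 1 else h + 1 + -(PySem.Int.floordiv (-(r + p - s)) (s - p)) := by
  intro r h
  induction r, h using get_line_height_loop.induct s p with
  | case1 r h hc hp' ih =>
    rw [get_line_height_loop, if_pos hc, if_pos hp', ih]
    have hb : 0 < s - p := by omega
    by_cases hend : r + p - s + p ≤ s
    · rw [if_pos hend, if_neg (by omega)]
      have : -(PySem.Int.floordiv (-(r + p - s)) (s - p)) = 1 :=
        (PySem.Int.neg_floordiv_neg_eq_iff_of_pos hb).mpr (by constructor <;> omega)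
      omega
    · rw [if_neg (by omega), if_neg (by omega)]
      have h1 : -(PySem.Int.floordiv (-(r + p - s)) (s - p)) =
          -(PySem.Int.floordiv (-(r + p - s + p - s)) (s - p)) + 1 := by
        set q := -(PySem.Int.floordiv (-(r + p - s + p - s)) (s - p)) with hq
        have h2 : (q - 1) * (s - p) < r + p - s + p - s ∧ r + p - s + p - s ≤ q * (s - p) :=
          (PySem.Int.neg_floordiv_neg_eq_iff_of_pos hb).mp hq.symm
        refine (PySem.Int.neg_floordiv_neg_eq_iff_of_pos hb).mpr ?_
        constructor <;> nlinarith [h2.1, h2.2]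
      omega
  | case2 r h hc hp' => rw [get_line_height_loop, if_pos hc, if_neg hp']; omega
  | case3 r h hc => rw [get_line_height_loop, if_neg hc, if_pos (by omega)]

-- ===== VERDICT (by name: the statement is the Claim_ definition above) =====
theorem get_line_height_spec : Claim_equal_get_line_height := by
  intro tw sw pw _ hpre
  unfold Spec_get_line_height get_line_height get_line_height_alt
  by_cases h0 : tw = 0
  · simp [h0]
  · rw [if_neg h0, if_neg h0]
    by_cases h1 : tw < sw
    · rw [if_pos h1, if_pos h1]
    · rw [if_neg h1, if_neg h1]
      rcases hpre with h | h | h | h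
      · omega
      · omega
      · rw [get_line_height_loop, if_neg (by omega)]
        simp only []
        rw [if_pos (by omega)]; norm_num
      · rw [get_line_height_loop_eq sw pw h]
        simp only []
        by_cases hov : tw - sw + pw - sw ≤ 0
        · rw [if_pos (by omega), if_pos (by omega)]; norm_num
        · rw [if_neg (by omega), if_neg (by omega)]; omega
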